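-- pv_equiv track=rewrite | github.com/varshcodes-lab/SmartFit | backend/services/rep_counter.py | count_pushup_reps
-- ===== SOURCE A (Python) =====
-- def count_pushup_reps(elbow_angles):
--     reps = 0
--     state = "up"
--
--     for angle in elbow_angles:
--         if angle < 90 and state == "up":
--             state = "down"
--         elif angle > 160 and state == "down":
--             reps += 1
--             state = "up"
--
--     return reps
-- ===== SOURCE B (Python) =====
-- def count_pushup_reps(elbow_angles):
--     # Event view: map each angle to a symbol ('D' below 90, 'U' above 160,
--     # skip the dead zone), then count adjacent D->U boundaries.
--     symbols = ['D' if a < 90 else 'U' for a in elbow_angles if a < 90 or a > 160]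
--     return sum(1 for x, y in zip(symbols, symbols[1:]) if x == 'D' and y == 'U')
-- ===== Notes on version B (the rewrite author's own statement) =====
-- stated objective: alternative
-- what changed: Replaces the up/down state-machine loop with a filterMap to D/U event symbols followed by a pairwise count of adjacent D,U boundaries.
import Mathlib
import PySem

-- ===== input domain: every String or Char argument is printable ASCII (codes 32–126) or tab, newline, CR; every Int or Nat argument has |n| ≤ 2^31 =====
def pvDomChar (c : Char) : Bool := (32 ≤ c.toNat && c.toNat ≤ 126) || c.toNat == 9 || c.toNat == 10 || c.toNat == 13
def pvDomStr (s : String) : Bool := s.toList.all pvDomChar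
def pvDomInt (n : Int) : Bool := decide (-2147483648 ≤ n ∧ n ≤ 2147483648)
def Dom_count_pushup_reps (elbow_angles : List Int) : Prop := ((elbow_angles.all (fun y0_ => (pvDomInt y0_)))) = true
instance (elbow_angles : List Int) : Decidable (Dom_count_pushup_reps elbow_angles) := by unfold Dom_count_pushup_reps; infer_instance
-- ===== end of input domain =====

-- B replaces A's up/down state-machine loop with a symbol stream (D/U events) and a
-- pairwise count of adjacent D,U boundaries; same value on every input.

-- ===== PORT A =====
def count_pushup_reps (elbow_angles : List Int) : Int :=
  (elbow_angles.foldl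
    (fun (acc : Int × String) angle =>
      if angle < 90 && acc.2 == "up" then (acc.1, "down")
      else if angle > 160 && acc.2 == "down" then (acc.1 + 1, "up")
      else acc)
    (0, "up")).1

-- ===== PORT B =====
def count_pushup_reps_alt (elbow_angles : List Int) : Int :=
  let symbols := elbow_angles.filterMap
    (fun a => if a < 90 ∨ a > 160 then some (if a < 90 then 'D' else 'U') else none)
  Int.ofNat ((symbols.zip symbols.tail).countP (fun p => p.1 == 'D' && p.2 == 'U'))

-- ===== PRECONDITION & SPEC =====
def Spec_count_pushup_reps (elbow_angles : List Int) (out : Int) : Prop := out = count_pushup_reps_alt elbow_angles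
instance (elbow_angles : List Int) (out : Int) : Decidable (Spec_count_pushup_reps elbow_angles out) := by unfold Spec_count_pushup_reps; infer_instance

-- ===== CLAIM (what is proved, stated in full; the proofs are below) =====
def Claim_equal_count_pushup_reps : Prop := ∀ (elbow_angles : List Int), Dom_count_pushup_reps elbow_angles → Spec_count_pushup_reps elbow_angles (count_pushup_reps elbow_angles)

-- ===== LEMMAS AND PROOFS =====

-- Proof-side recursive form of B's pairwise D,U boundary count.
def cntDU : List Char → Int
  | [] => 0
  | [_] => 0
  | x :: y :: t => (if x = 'D' ∧ y = 'U' then 1 else 0) + cntDU (y :: t)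

-- A's loop, restricted to the symbol stream (state true = "up").
def fSym : Bool → List Char → Int
  | _, [] => 0
  | true, c :: t => if c = 'D' then fSym false t else fSym true t
  | false, c :: t => if c = 'U' then 1 + fSym true t else fSym false t

def syms (l : List Int) : List Char :=
  l.filterMap (fun a => if a < 90 ∨ a > 160 then some (if a < 90 then 'D' else 'U') else none)

-- A's loop body, named for the proofs (definitionally the lambda in the port).
def pvStep : (Int × String) → Int → (Int × String) := fun acc angle =>
  if angle < 90 && acc.2 == "up" then (acc.1, "down")
  else if angle > 160 && acc.2 == "down" then (acc.1 + 1, "up")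
  else acc

lemma A_eq_foldl (l : List Int) : count_pushup_reps l = (l.foldl pvStep (0, "up")).1 := rfl

lemma step_up_down {a reps : Int} (h : a < 90) : pvStep (reps, "up") a = (reps, "down") := by
  simp [pvStep, h]

lemma step_up_keep {a reps : Int} (h : ¬ a < 90) : pvStep (reps, "up") a = (reps, "up") := by
  simp [pvStep, h]

lemma step_down_up {a reps : Int} (h1 : ¬ a < 90) (h2 : a > 160) :
    pvStep (reps, "down") a = (reps + 1, "up") := by
  simp [pvStep, h1, h2]

lemma step_down_keep {a reps : Int} (h2 : ¬ a > 160) :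
    pvStep (reps, "down") a = (reps, "down") := by
  simp [pvStep, h2]

lemma cntDU_eq_countP (s : List Char) :
    Int.ofNat ((s.zip s.tail).countP (fun p => p.1 == 'D' && p.2 == 'U')) = cntDU s := by
  match s with
  | [] => simp [cntDU]
  | [_] => simp [cntDU]
  | x :: y :: t =>
    have ih := cntDU_eq_countP (y :: t)
    simp only [List.tail_cons, List.zip_cons_cons, List.countP_cons, cntDU] at *
    by_cases h : x = 'D' ∧ y = 'U'
    · obtain ⟨hx, hy⟩ := h
      subst hx; subst hy
      rw [← ih]
      simp
      omega
    · have hp : (x == 'D' && y == 'U') = false := by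
        rcases Decidable.not_and_iff_not_or_not.mp h with h1 | h1 <;> simp [h1]
      rw [if_neg h, hp]
      simpa using ih

lemma fSym_eq_cntDU (s : List Char) (hDU : ∀ c ∈ s, c = 'D' ∨ c = 'U') :
    fSym true s = cntDU s ∧ fSym false s = cntDU ('D' :: s) := by
  induction s with
  | nil => simp [fSym, cntDU]
  | cons c t ih =>
    have hc := hDU c (by simp)
    have iht := ih (fun x hx => hDU x (by simp [hx]))
    rcases hc with hc | hc <;> subst hc
    · refine ⟨?_, ?_⟩
      · show fSym true ('D' :: t) = cntDU ('D' :: t)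
        simpa [fSym] using iht.2
      · show fSym false ('D' :: t) = cntDU ('D' :: 'D' :: t)
        have h1 : fSym false ('D' :: t) = fSym false t := by simp [fSym]
        rw [h1, iht.2]
        simp [cntDU]
    · refine ⟨?_, ?_⟩
      · show fSym true ('U' :: t) = cntDU ('U' :: t)
        have h1 : fSym true ('U' :: t) = fSym true t := by simp [fSym]
        rw [h1, iht.1]
        cases t with
        | nil => simp [cntDU]
        | cons y r => simp [cntDU]
      · show fSym false ('U' :: t) = cntDU ('D' :: 'U' :: t)
        have h1 : fSym false ('U' :: t) = 1 + fSym true t := by simp [fSym]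
        rw [h1, iht.1]
        cases t with
        | nil => simp [cntDU]
        | cons y r =>
          simp [cntDU]

lemma syms_mem (l : List Int) : ∀ c ∈ syms l, c = 'D' ∨ c = 'U' := by
  intro c hc
  simp only [syms, List.mem_filterMap] at hc
  obtain ⟨a, _, ha⟩ := hc
  by_cases h : a < 90 ∨ a > 160
  · simp [h] at ha
    by_cases h2 : a < 90 <;> simp [h2] at ha <;> simp [← ha]
  · simp [h] at ha

lemma loop_eq_fSym (l : List Int) : ∀ (reps : Int),
    (l.foldl pvStep (reps, "up")).1 = reps + fSym true (syms l)
    ∧ (l.foldl pvStep (reps, "down")).1 = reps + fSym false (syms l) := by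
  induction l with
  | nil => intro reps; simp [syms, fSym]
  | cons a t ih =>
    intro reps
    have hsy : syms (a :: t) =
        (if a < 90 ∨ a > 160 then [if a < 90 then 'D' else 'U'] else []) ++ syms t := by
      by_cases h : a < 90 ∨ a > 160 <;> simp [syms, h]
    by_cases h1 : a < 90
    · have h160 : ¬ a > 160 := by omega
      refine ⟨?_, ?_⟩
      · rw [List.foldl_cons, step_up_down h1, (ih reps).2, hsy]
        simp [h1, fSym]
      · rw [List.foldl_cons, step_down_keep h160, (ih reps).2, hsy]
        simp [h1, fSym]
    · by_cases h2 : a > 160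
      · refine ⟨?_, ?_⟩
        · rw [List.foldl_cons, step_up_keep h1, (ih reps).1, hsy]
          simp [h1, h2, fSym]
        · rw [List.foldl_cons, step_down_up h1 h2, (ih (reps + 1)).1, hsy]
          simp [h1, h2, fSym]
          omega
      · have hno : ¬ (a < 90 ∨ a > 160) := by omega
        refine ⟨?_, ?_⟩
        · rw [List.foldl_cons, step_up_keep h1, (ih reps).1, hsy]
          simp [hno]
        · rw [List.foldl_cons, step_down_keep h2, (ih reps).2, hsy]
          simp [hno]

-- ===== VERDICT (by name: the statement is the Claim_ definition above) =====
theorem count_pushup_reps_spec : Claim_equal_count_pushup_reps := by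
  intro l _
  show count_pushup_reps l = count_pushup_reps_alt l
  rw [A_eq_foldl, (loop_eq_fSym l 0).1, (fSym_eq_cntDU (syms l) (syms_mem l)).1,
    ← cntDU_eq_countP (syms l)]
  simp [count_pushup_reps_alt, syms]
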